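-- pv_equiv track=rewrite | github.com/usuallycwdillon/remarkable-calendar | data_processor.py | format_task_labels
-- ===== SOURCE A (Python) =====
-- def format_task_labels(labels):
--     """Format labels with time tags first."""
--     time_tags = []
--     other_tags = []
--
--     for label in labels:
--         if 'min' in label or 'hr' in label:
--             time_tags.append(f"@{label}")
--         else:
--             other_tags.append(f"@{label}")
--
--     return ' '.join(time_tags + other_tags)
-- ===== SOURCE B (Python) =====
-- def format_task_labels(labels):
--     """Format labels with time tags first."""
--     ordered = sorted(labels, key=lambda l: 0 if ('min' in l or 'hr' in l) else 1)
--     return ' '.join('@' + l for l in ordered)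
-- ===== Notes on version B (the rewrite author's own statement) =====
-- stated objective: alternative
-- what changed: Replaced the two-bucket partition loop with a single stable sort by a 0/1 priority key (time tags first) followed by one tag-and-join pass; stability preserves each group's original order.
import Mathlib
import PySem

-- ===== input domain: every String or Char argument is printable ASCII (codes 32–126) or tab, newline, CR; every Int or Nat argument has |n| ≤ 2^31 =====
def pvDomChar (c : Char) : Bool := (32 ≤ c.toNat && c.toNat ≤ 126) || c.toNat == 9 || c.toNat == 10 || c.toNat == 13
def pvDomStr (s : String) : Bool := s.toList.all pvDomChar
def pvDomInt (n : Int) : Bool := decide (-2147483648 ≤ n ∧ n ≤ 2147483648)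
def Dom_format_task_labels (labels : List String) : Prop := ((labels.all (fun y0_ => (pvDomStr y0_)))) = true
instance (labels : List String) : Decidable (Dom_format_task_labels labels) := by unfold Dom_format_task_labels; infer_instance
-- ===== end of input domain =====

-- B replaces A's two-bucket partition loop with one stable sort by a 0/1 priority key,
-- then a single tag-and-join pass (objective: alternative decomposition, same behaviour).

-- ===== PORT A =====
def format_task_labels (labels : List String) : String :=
  let r := labels.foldl
    (fun (acc : List String × List String) label =>
      if PySem.Str.isIn "min" label || PySem.Str.isIn "hr" label then
        (acc.1 ++ ["@" ++ label], acc.2)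
      else
        (acc.1, acc.2 ++ ["@" ++ label]))
    ([], [])
  PySem.Str.join " " (r.1 ++ r.2)

-- ===== PORT B =====
-- B-side helper: the sort key 0 if ('min' in l or 'hr' in l) else 1
def pvKey (l : String) : Int :=
  if PySem.Str.isIn "min" l || PySem.Str.isIn "hr" l then 0 else 1

def format_task_labels_alt (labels : List String) : String :=
  PySem.Str.join " " ((PySem.List.sorted labels pvKey).map (fun l => "@" ++ l))

-- ===== PRECONDITION & SPEC =====
def Spec_format_task_labels (labels : List String) (out : String) : Prop := out = format_task_labels_alt labels
instance (labels : List String) (out : String) : Decidable (Spec_format_task_labels labels out) := by unfold Spec_format_task_labels; infer_instance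

-- ===== CLAIM (what is proved, stated in full; the proofs are below) =====
def Claim_equal_format_task_labels : Prop := ∀ (labels : List String), Dom_format_task_labels labels → Spec_format_task_labels labels (format_task_labels labels)

-- ===== LEMMAS AND PROOFS =====

-- the partition predicate both programs branch on
def pvP (l : String) : Bool := PySem.Str.isIn "min" l || PySem.Str.isIn "hr" l

theorem pvKey_eq (l : String) : pvKey l = if pvP l then 0 else 1 := rfl

theorem pvKey_le_one (l : String) : pvKey l ≤ 1 := by
  rw [pvKey_eq]; split <;> norm_num

-- inserting into (time-bucket ++ other-bucket) keeps the shape (stability of insertBy)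
theorem insertBy_buckets (x : String) (A B : List String)
    (hA : ∀ a ∈ A, pvP a = true) (hB : ∀ b ∈ B, pvP b = false) :
    PySem.List.insertBy (fun a b => decide (pvKey a < pvKey b)) x (A ++ B) =
      if pvP x then A ++ x :: B else (A ++ B) ++ [x] := by
  by_cases hx : pvP x
  · simp only [hx, if_true]
    induction A with
    | nil =>
      simp only [List.nil_append]
      cases B with
      | nil => rfl
      | cons b B' =>
        have hb : pvP b = false := hB b (by simp)
        simp [PySem.List.insertBy, pvKey_eq, hx, hb]
    | cons a A' ih =>
      have ha : pvP a = true := hA a (by simp)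
      have step : (decide (pvKey x < pvKey a)) = false := by
        simp [pvKey_eq, hx, ha]
      simp only [List.cons_append, PySem.List.insertBy, step, Bool.false_eq_true, if_false]
      rw [ih (fun a' ha' => hA a' (by simp [ha']))]
  · simp only [hx, Bool.false_eq_true, if_false]
    apply PySem.List.insertBy_of_forall_not_before
    intro y _
    have h1 : pvKey x = 1 := by rw [pvKey_eq]; simp [hx]
    have := pvKey_le_one y
    simp only [h1, decide_eq_false_iff_not]
    omega

-- the insertion-sort fold keeps the two filtered buckets, in order
theorem foldl_insertBy_buckets (ls : List String) (A B : List String)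
    (hA : ∀ a ∈ A, pvP a = true) (hB : ∀ b ∈ B, pvP b = false) :
    ls.foldl (fun acc x => PySem.List.insertBy (fun a b => decide (pvKey a < pvKey b)) x acc) (A ++ B)
      = (A ++ ls.filter pvP) ++ (B ++ ls.filter (fun l => !pvP l)) := by
  induction ls generalizing A B with
  | nil => simp
  | cons x t ih =>
    simp only [List.foldl_cons]
    rw [insertBy_buckets x A B hA hB]
    by_cases hx : pvP x
    · simp only [hx, if_true]
      have : A ++ x :: B = (A ++ [x]) ++ B := by simp
      rw [this, ih (A ++ [x]) B
        (by intro a ha; rcases List.mem_append.mp ha with h | h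
            · exact hA a h
            · simp at h; subst h; exact hx) hB]
      simp [hx]
    · simp only [hx, Bool.false_eq_true, if_false]
      rw [List.append_assoc, ih A (B ++ [x]) hA
        (by intro b hb; rcases List.mem_append.mp hb with h | h
            · exact hB b h
            · simp at h; subst h; simpa using hx)]
      simp [hx]

-- B's sort is exactly: time labels first (in order), then the rest (in order)
theorem sorted_buckets (labels : List String) :
    PySem.List.sorted labels pvKey
      = labels.filter pvP ++ labels.filter (fun l => !pvP l) := by
  rw [PySem.List.sorted_eq_foldl_insertBy]
  have := foldl_insertBy_buckets labels [] [] (by simp) (by simp)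
  simpa using this

-- A's fold builds the two tagged buckets appended to the accumulator
theorem foldl_partition (ls : List String) (T O : List String) :
    ls.foldl
      (fun (acc : List String × List String) label =>
        if PySem.Str.isIn "min" label || PySem.Str.isIn "hr" label then
          (acc.1 ++ ["@" ++ label], acc.2)
        else
          (acc.1, acc.2 ++ ["@" ++ label]))
      (T, O)
      = (T ++ (ls.filter pvP).map (fun l => "@" ++ l),
         O ++ (ls.filter (fun l => !pvP l)).map (fun l => "@" ++ l)) := by
  induction ls generalizing T O with
  | nil => simp
  | cons x t ih =>
    simp only [List.foldl_cons]
    by_cases hx : pvP x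
    · have hx' : (PySem.Str.isIn "min" x || PySem.Str.isIn "hr" x) = true := hx
      simp only [hx', if_true]
      rw [ih]
      simp [hx]
    · have hx' : (PySem.Str.isIn "min" x || PySem.Str.isIn "hr" x) = false := by
        simpa [pvP] using hx
      simp only [hx', Bool.false_eq_true, if_false]
      rw [ih]
      simp [hx]

-- ===== VERDICT (by name: the statement is the Claim_ definition above) =====
theorem format_task_labels_spec : Claim_equal_format_task_labels := by
  intro labels _
  unfold Spec_format_task_labels format_task_labels format_task_labels_alt
  rw [sorted_buckets, foldl_partition]
  simp
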